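-- pv_equiv track=rewrite | github.com/Studiacion/turbo-umbrella | processing/covid-API-graph.py | total_to_daily
-- ===== SOURCE A (Python) =====
-- def total_to_daily(confirmed):
-- 	total = 0
-- 	daily = []
-- 	for i in range(len(confirmed)):
-- 		day_i = int(confirmed[i])-int(total)
-- 		daily.append(day_i)
-- 		total = int(confirmed[i])
-- 	return (daily)
-- ===== SOURCE B (Python) =====
-- def total_to_daily(confirmed):
--     # Divide and conquer: the daily increments of a cumulative series split as
--     # left+right are (increments of left w.r.t. prev) + (increments of right
--     # w.r.t. left's last cumulative value).
--     xs = [int(c) for c in confirmed]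
--
--     def diffs(seg, prev):
--         if len(seg) <= 1:
--             return [x - prev for x in seg]
--         mid = len(seg) // 2
--         left, right = seg[:mid], seg[mid:]
--         return diffs(left, prev) + diffs(right, left[-1])
--
--     return diffs(xs, 0)
-- ===== Notes on version B (the rewrite author's own statement) =====
-- stated objective: alternative
-- what changed: Replaced the single left-to-right scan with a running total by a divide-and-conquer recursion: split the cumulative series in half, difference each half independently (the right half's predecessor is the left half's last value), and concatenate.
import Mathlib
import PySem

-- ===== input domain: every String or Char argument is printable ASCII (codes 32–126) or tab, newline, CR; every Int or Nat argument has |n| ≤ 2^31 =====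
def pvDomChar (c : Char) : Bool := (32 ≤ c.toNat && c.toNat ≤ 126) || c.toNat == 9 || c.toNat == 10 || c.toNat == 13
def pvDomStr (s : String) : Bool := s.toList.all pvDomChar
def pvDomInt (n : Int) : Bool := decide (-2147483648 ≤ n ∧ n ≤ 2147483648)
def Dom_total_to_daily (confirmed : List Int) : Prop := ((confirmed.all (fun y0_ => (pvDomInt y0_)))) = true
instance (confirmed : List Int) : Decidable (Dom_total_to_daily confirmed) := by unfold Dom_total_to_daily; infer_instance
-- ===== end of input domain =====

-- B replaces A's single scan with a running total by a divide-and-conquer recursion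
-- (difference each half, the right half's predecessor being the left half's last value).

-- ===== PORT A =====
-- A indexes confirmed[i] only for i in range(len(confirmed)), always in range,
-- so pyGetD with default 0 is exact here.
def total_to_daily (confirmed : List Int) : List Int :=
  ((PySem.List.pyRange 0 (PySem.List.len confirmed) 1).foldl
    (fun (st : Int × List Int) i =>
      let c := PySem.List.pyGetD confirmed i 0
      (c, st.2 ++ [c - st.1]))
    (0, [])).2

-- ===== PORT B =====
-- Source B's diffs(seg, prev): base case len(seg) <= 1, else split at mid = len//2
-- and recurse; left[-1] (left nonempty at that call) is pyGetD left (-1) 0, exact there.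
def pvDiffs (seg : List Int) (prev : Int) : List Int :=
  if _h : seg.length ≤ 1 then seg.map (fun x => x - prev)
  else
    let mid := seg.length / 2
    let left := seg.take mid
    let right := seg.drop mid
    pvDiffs left prev ++ pvDiffs right (PySem.List.pyGetD left (-1) 0)
termination_by seg.length
decreasing_by
  · simp only [List.length_take]; omega
  · simp only [List.length_drop]; omega

def total_to_daily_alt (confirmed : List Int) : List Int :=
  pvDiffs (confirmed.map (fun c => c)) 0

-- ===== PRECONDITION & SPEC =====
def Spec_total_to_daily (confirmed : List Int) (out : List Int) : Prop := out = total_to_daily_alt confirmed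
instance (confirmed : List Int) (out : List Int) : Decidable (Spec_total_to_daily confirmed out) := by unfold Spec_total_to_daily; infer_instance

-- ===== CLAIM (what is proved, stated in full; the proofs are below) =====
def Claim_equal_total_to_daily : Prop := ∀ (confirmed : List Int), Dom_total_to_daily confirmed → Spec_total_to_daily confirmed (total_to_daily confirmed)

-- ===== LEMMAS AND PROOFS =====

-- Characterisation of A's loop: successive differences with `total` in front.
theorem foldl_diff_invariant (xs : List Int) (total : Int) (acc : List Int) :
    (xs.foldl (fun (st : Int × List Int) c => (c, st.2 ++ [c - st.1])) (total, acc)).2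
      = acc ++ List.zipWith (fun c p => c - p) xs (total :: xs) := by
  induction xs generalizing total acc with
  | nil => simp
  | cons x xs ih =>
    simp only [List.foldl_cons, List.zipWith_cons_cons, ih, List.append_assoc, List.cons_append,
      List.nil_append]

-- Pairwise differencing splits at any concatenation point, the right part's
-- predecessor being the last element of (prev :: left).
theorem zipWith_diff_append (l r : List Int) (prev : Int) :
    List.zipWith (fun c p => c - p) (l ++ r) (prev :: (l ++ r))
      = List.zipWith (fun c p => c - p) l (prev :: l)
        ++ List.zipWith (fun c p => c - p) r ((prev :: l).getLast (by simp) :: r) := by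
  induction l generalizing prev with
  | nil => simp
  | cons x l ih =>
    simp only [List.cons_append, List.zipWith_cons_cons, ih x, List.getLast_cons_cons]

-- B's divide-and-conquer computes exactly the successive differences.
theorem pvDiffs_eq (seg : List Int) (prev : Int) :
    pvDiffs seg prev = List.zipWith (fun c p => c - p) seg (prev :: seg) := by
  unfold pvDiffs
  split
  · rename_i h
    match seg, h with
    | [], _ => simp
    | [x], _ => simp
  · rename_i h
    have hmidpos : 1 ≤ seg.length / 2 := by omega
    have htd : seg.take (seg.length / 2) ++ seg.drop (seg.length / 2) = seg :=
      List.take_append_drop _ _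
    have hlne : seg.take (seg.length / 2) ≠ [] := by
      intro hc
      have := congrArg List.length hc
      simp only [List.length_take, List.length_nil] at this
      omega
    show pvDiffs (seg.take (seg.length / 2)) prev
        ++ pvDiffs (seg.drop (seg.length / 2))
             (PySem.List.pyGetD (seg.take (seg.length / 2)) (-1) 0)
      = List.zipWith (fun c p => c - p) seg (prev :: seg)
    rw [pvDiffs_eq (seg.take (seg.length / 2)) prev,
        pvDiffs_eq (seg.drop (seg.length / 2)) _]
    have hlast : PySem.List.pyGetD (seg.take (seg.length / 2)) (-1) 0
        = (prev :: seg.take (seg.length / 2)).getLast (by simp) := by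
      rw [List.getLast_cons hlne, List.getLast_eq_getElem]
      simp only [PySem.List.pyGetD, PySem.List.pyGet?, PySem.List.pyIdx?]
      norm_num
      have hc : 1 ≤ (seg.length : Int) / 2 ∧ 1 ≤ seg.length := ⟨by omega, by omega⟩
      rw [if_pos hc, Option.bind_some]
      have hlt : min (seg.length / 2) seg.length - 1 < seg.length / 2 := by omega
      rw [List.getElem?_take_of_lt hlt, List.getElem?_eq_getElem (by omega)]
      rfl
    rw [hlast]
    conv_rhs => rw [← htd]
    exact (zipWith_diff_append _ _ prev).symm
termination_by seg.length
decreasing_by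
  · simp only [List.length_take]; omega
  · simp only [List.length_drop]; omega

-- ===== VERDICT (by name: the statement is the Claim_ definition above) =====
theorem total_to_daily_spec : Claim_equal_total_to_daily := by
  intro confirmed _
  unfold Spec_total_to_daily total_to_daily total_to_daily_alt
  rw [PySem.List.foldl_pyRange_zero_pyGetD confirmed 0
        (fun (st : Int × List Int) c => (c, st.2 ++ [c - st.1])) (0, [])]
  rw [List.map_id']
  rw [pvDiffs_eq]
  simpa using foldl_diff_invariant confirmed 0 []
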